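-- pv_equiv track=rewrite | github.com/pypi-data/pypi-mirror-372 | packages/Apimatic/apimatic-0.1.8-py3-none-any.whl/Apimatic/parsers/express.py | _extract_function_like
-- ===== SOURCE A (Python) =====
-- from typing import List, Dict, Optional, Iterable, Tuple
--
-- def _extract_function_like(substring: str) -> Optional[str]:
--     """Extracts inline function or arrow function source code from a substring."""
--     try:
--         # ---- Match function signature (parentheses) ----
--         paren_level, sig_end = 0, -1
--         for i, char in enumerate(substring):
--             if char == "(":
--                 paren_level += 1
--             elif char == ")":
--                 paren_level -= 1
--                 if paren_level == 0:
--                     sig_end = i + 1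
--                     break
--         if sig_end == -1:
--             return None
--
--         # ---- Match function body (curly braces) ----
--         body_start = substring.find("{", sig_end)
--         if body_start == -1:
--             return None
--
--         brace_level, body_end = 1, -1
--         for i, char in enumerate(substring[body_start + 1:], start=body_start + 1):
--             if char == "{":
--                 brace_level += 1
--             elif char == "}":
--                 brace_level -= 1
--                 if brace_level == 0:
--                     body_end = i + 1
--                     break
--
--         return substring[:body_end] if body_end != -1 else None
--     except IndexError:
--         return None
-- ===== SOURCE B (Python) =====
-- from typing import Optional
--
-- def _extract_function_like(substring: str) -> Optional[str]:
--     """Single pass with a phase state machine: 0 = balance parens,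
--     1 = skip to the body's '{', 2 = balance braces."""
--     phase, level = 0, 0
--     for i, ch in enumerate(substring):
--         if phase == 0:
--             if ch == "(":
--                 level += 1
--             elif ch == ")":
--                 level -= 1
--                 if level == 0:
--                     phase = 1
--         elif phase == 1:
--             if ch == "{":
--                 phase, level = 2, 1
--         else:
--             if ch == "{":
--                 level += 1
--             elif ch == "}":
--                 level -= 1
--                 if level == 0:
--                     return substring[:i + 1]
--     return None
-- ===== Notes on version B (the rewrite author's own statement) =====
-- stated objective: simpler
-- what changed: Replaces A's three separate scans (paren loop, str.find for '{', brace loop over a slice) by one single pass over the string driven by a phase state machine, with no slicing or restarts.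
import Mathlib
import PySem

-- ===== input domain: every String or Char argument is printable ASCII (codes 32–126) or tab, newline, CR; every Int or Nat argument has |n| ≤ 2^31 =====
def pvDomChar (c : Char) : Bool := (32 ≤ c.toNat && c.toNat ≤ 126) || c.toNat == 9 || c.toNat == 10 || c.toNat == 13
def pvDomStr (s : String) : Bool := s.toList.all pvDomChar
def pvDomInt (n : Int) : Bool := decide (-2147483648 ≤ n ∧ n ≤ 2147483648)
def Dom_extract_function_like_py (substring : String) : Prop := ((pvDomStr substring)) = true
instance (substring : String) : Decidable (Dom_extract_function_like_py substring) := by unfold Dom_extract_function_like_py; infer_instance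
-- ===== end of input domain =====

-- B replaces A's three separate scans by one single pass driven by a phase state machine (objective: simpler).

-- ===== PORT A =====
-- A's first loop: paren balancing with enumerate index i; returns sig_end = i+1 when level hits 0 at a ')'.
def pvFindParen : List Char → Int → Nat → Option Nat
  | [], _, _ => none
  | c :: rest, level, i =>
    if c = '(' then pvFindParen rest (level + 1) (i + 1)
    else if c = ')' then
      let level' := level - 1
      if level' = 0 then some (i + 1) else pvFindParen rest level' (i + 1)
    else pvFindParen rest level (i + 1)

-- substring.find("{", start): scan the suffix from `start`, carrying the absolute index.
def pvFindBraceFrom : List Char → Nat → Option Nat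
  | [], _ => none
  | c :: rest, i => if c = '{' then some i else pvFindBraceFrom rest (i + 1)

-- A's second loop: brace balancing over substring[body_start+1:], enumerate started at body_start+1.
def pvFindBody : List Char → Int → Nat → Option Nat
  | [], _, _ => none
  | c :: rest, level, i =>
    if c = '{' then pvFindBody rest (level + 1) (i + 1)
    else if c = '}' then
      let level' := level - 1
      if level' = 0 then some (i + 1) else pvFindBody rest level' (i + 1)
    else pvFindBody rest level (i + 1)

def extract_function_like_py (substring : String) : Option String :=
  match pvFindParen substring.toList 0 0 with
  | none => none
  | some sigEnd =>
    match pvFindBraceFrom (substring.toList.drop sigEnd) sigEnd with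
    | none => none
    | some bodyStart =>
      match pvFindBody (substring.toList.drop (bodyStart + 1)) 1 (bodyStart + 1) with
      | none => none
      | some bodyEnd => some (String.mk (substring.toList.take bodyEnd))

-- ===== PORT B =====
-- B's single loop: phase 0 balances parens, phase 1 skips to the body's '{', phase 2 balances braces.
def pvScan : List Char → Nat → Nat → Int → Option Nat
  | [], _, _, _ => none
  | c :: rest, i, phase, level =>
    if phase = 0 then
      if c = '(' then pvScan rest (i + 1) 0 (level + 1)
      else if c = ')' then
        let level' := level - 1
        if level' = 0 then pvScan rest (i + 1) 1 level'
        else pvScan rest (i + 1) 0 level'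
      else pvScan rest (i + 1) 0 level
    else if phase = 1 then
      if c = '{' then pvScan rest (i + 1) 2 1
      else pvScan rest (i + 1) 1 level
    else
      if c = '{' then pvScan rest (i + 1) 2 (level + 1)
      else if c = '}' then
        let level' := level - 1
        if level' = 0 then some (i + 1) else pvScan rest (i + 1) 2 level'
      else pvScan rest (i + 1) 2 level

def extract_function_like_py_alt (substring : String) : Option String :=
  match pvScan substring.toList 0 0 0 with
  | none => none
  | some bodyEnd => some (String.mk (substring.toList.take bodyEnd))

-- ===== PRECONDITION & SPEC =====
def Spec_extract_function_like_py (substring : String) (out : Option String) : Prop := out = extract_function_like_py_alt substring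
instance (substring : String) (out : Option String) : Decidable (Spec_extract_function_like_py substring out) := by unfold Spec_extract_function_like_py; infer_instance

-- ===== CLAIM (what is proved, stated in full; the proofs are below) =====
def Claim_equal_extract_function_like_py : Prop := ∀ (substring : String), Dom_extract_function_like_py substring → Spec_extract_function_like_py substring (extract_function_like_py substring)

-- ===== LEMMAS AND PROOFS =====

theorem pvFindParen_gt : ∀ (xs : List Char) (level : Int) (i j : Nat),
    pvFindParen xs level i = some j → i < j := by
  intro xs
  induction xs with
  | nil => intro level i j h; simp [pvFindParen] at h
  | cons c rest ih =>
    intro level i j h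
    simp only [pvFindParen] at h
    split_ifs at h with h1 h2 h3
    · exact Nat.lt_of_succ_le (Nat.le_of_lt (ih _ _ _ h))
    · simp only [Option.some.injEq] at h; omega
    · exact Nat.lt_of_succ_le (Nat.le_of_lt (ih _ _ _ h))
    · exact Nat.lt_of_succ_le (Nat.le_of_lt (ih _ _ _ h))

theorem pvFindBraceFrom_ge : ∀ (xs : List Char) (i j : Nat),
    pvFindBraceFrom xs i = some j → i ≤ j := by
  intro xs
  induction xs with
  | nil => intro i j h; simp [pvFindBraceFrom] at h
  | cons c rest ih =>
    intro i j h
    simp only [pvFindBraceFrom] at h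
    split_ifs at h with h1
    · simp only [Option.some.injEq] at h; omega
    · exact Nat.le_of_succ_le (ih _ _ h)

-- Phase 2 of B is exactly A's brace loop.
theorem pvScan_phase2 : ∀ (xs : List Char) (i : Nat) (level : Int),
    pvScan xs i 2 level = pvFindBody xs level i := by
  intro xs
  induction xs with
  | nil => intro i level; simp [pvScan, pvFindBody]
  | cons c rest ih =>
    intro i level
    simp only [pvScan, pvFindBody]
    split_ifs <;> simp_all

-- Phase 1 of B is A's find('{', i) followed by phase 2 on the rest with brace level 1.
theorem pvScan_phase1 : ∀ (xs : List Char) (i : Nat) (level : Int),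
    pvScan xs i 1 level =
      match pvFindBraceFrom xs i with
      | none => none
      | some j => pvScan (xs.drop (j - i + 1)) (j + 1) 2 1 := by
  intro xs
  induction xs with
  | nil => intro i level; simp [pvScan, pvFindBraceFrom]
  | cons c rest ih =>
    intro i level
    by_cases h1 : c = '{'
    · simp [pvScan, pvFindBraceFrom, h1]
    · have hL : pvScan (c :: rest) i 1 level = pvScan rest (i + 1) 1 level := by
        simp [pvScan, h1]
      have hR : pvFindBraceFrom (c :: rest) i = pvFindBraceFrom rest (i + 1) := by
        simp [pvFindBraceFrom, h1]
      rw [hL, hR, ih]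
      cases hf : pvFindBraceFrom rest (i + 1) with
      | none => rfl
      | some j =>
        have hij := pvFindBraceFrom_ge rest (i + 1) j hf
        dsimp only
        have e : (c :: rest).drop (j - i + 1) = rest.drop (j - (i + 1) + 1) := by
          rw [List.drop_succ_cons]
          congr 1
          omega
        rw [e]

-- Phase 0 of B is A's paren loop followed by phase 1 on the rest.
theorem pvScan_phase0 : ∀ (xs : List Char) (i : Nat) (level : Int),
    pvScan xs i 0 level =
      match pvFindParen xs level i with
      | none => none
      | some j => pvScan (xs.drop (j - i)) j 1 0 := by
  intro xs
  induction xs with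
  | nil => intro i level; simp [pvScan, pvFindParen]
  | cons c rest ih =>
    intro i level
    by_cases h1 : c = '('
    · have hL : pvScan (c :: rest) i 0 level = pvScan rest (i + 1) 0 (level + 1) := by
        simp [pvScan, h1]
      have hR : pvFindParen (c :: rest) level i = pvFindParen rest (level + 1) (i + 1) := by
        simp [pvFindParen, h1]
      rw [hL, hR, ih]
      cases hf : pvFindParen rest (level + 1) (i + 1) with
      | none => rfl
      | some j =>
        have hij := pvFindParen_gt rest (level + 1) (i + 1) j hf
        dsimp only
        have e : (c :: rest).drop (j - i) = rest.drop (j - (i + 1)) := by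
          have e2 : j - i = (j - (i + 1)) + 1 := by omega
          rw [e2, List.drop_succ_cons]
        rw [e]
    · by_cases h2 : c = ')'
      · by_cases h3 : level - 1 = 0
        · have hL : pvScan (c :: rest) i 0 level = pvScan rest (i + 1) 1 (level - 1) := by
            simp [pvScan, h2, h3]
          have hR : pvFindParen (c :: rest) level i = some (i + 1) := by
            simp [pvFindParen, h2, h3]
          rw [hL, hR]
          dsimp only
          have e : (c :: rest).drop (i + 1 - i) = rest := by
            have e2 : i + 1 - i = 1 := by omega
            rw [e2]; rfl
          rw [e, h3]
        · have hL : pvScan (c :: rest) i 0 level = pvScan rest (i + 1) 0 (level - 1) := by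
            simp [pvScan, h2, h3]
          have hR : pvFindParen (c :: rest) level i = pvFindParen rest (level - 1) (i + 1) := by
            simp [pvFindParen, h2, h3]
          rw [hL, hR, ih]
          cases hf : pvFindParen rest (level - 1) (i + 1) with
          | none => rfl
          | some j =>
            have hij := pvFindParen_gt rest (level - 1) (i + 1) j hf
            dsimp only
            have e : (c :: rest).drop (j - i) = rest.drop (j - (i + 1)) := by
              have e2 : j - i = (j - (i + 1)) + 1 := by omega
              rw [e2, List.drop_succ_cons]
            rw [e]
      · have hL : pvScan (c :: rest) i 0 level = pvScan rest (i + 1) 0 level := by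
          simp [pvScan, h1, h2]
        have hR : pvFindParen (c :: rest) level i = pvFindParen rest level (i + 1) := by
          simp [pvFindParen, h1, h2]
        rw [hL, hR, ih]
        cases hf : pvFindParen rest level (i + 1) with
        | none => rfl
        | some j =>
          have hij := pvFindParen_gt rest level (i + 1) j hf
          dsimp only
          have e : (c :: rest).drop (j - i) = rest.drop (j - (i + 1)) := by
            have e2 : j - i = (j - (i + 1)) + 1 := by omega
            rw [e2, List.drop_succ_cons]
          rw [e]

-- B's single pass, phase by phase, is A's three-scan pipeline.
theorem pvScan_eq_three_phases (l : List Char) :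
    pvScan l 0 0 0 =
      match pvFindParen l 0 0 with
      | none => none
      | some sigEnd =>
        match pvFindBraceFrom (l.drop sigEnd) sigEnd with
        | none => none
        | some bodyStart => pvFindBody (l.drop (bodyStart + 1)) 1 (bodyStart + 1) := by
  rw [pvScan_phase0]
  cases hp : pvFindParen l 0 0 with
  | none => rfl
  | some sigEnd =>
    dsimp only
    rw [Nat.sub_zero, pvScan_phase1]
    cases hb : pvFindBraceFrom (l.drop sigEnd) sigEnd with
    | none => rfl
    | some bodyStart =>
      have hge := pvFindBraceFrom_ge _ _ _ hb
      dsimp only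
      rw [List.drop_drop]
      have e2 : sigEnd + (bodyStart - sigEnd + 1) = bodyStart + 1 := by omega
      rw [e2, pvScan_phase2]

-- ===== VERDICT (by name: the statement is the Claim_ definition above) =====
theorem extract_function_like_py_spec : Claim_equal_extract_function_like_py := by
  intro s _
  unfold Spec_extract_function_like_py extract_function_like_py extract_function_like_py_alt
  rw [pvScan_eq_three_phases]
  cases hp : pvFindParen s.toList 0 0 with
  | none => rfl
  | some sigEnd =>
    dsimp only
    cases hb : pvFindBraceFrom (s.toList.drop sigEnd) sigEnd with
    | none => rfl
    | some bodyStart =>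
      dsimp only
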